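-- pv_equiv track=rewrite | github.com/LiyangTseng/Necessitas.ai | backend/app/agents/resume_analyzer/resume_analyzer.py | _analyze_career_progression
-- ===== SOURCE A (Python) =====
-- from typing import Dict, List, Any, Optional
--
-- def _analyze_career_progression(experience: List[Dict[str, Any]]) -> str:
--     """Analyze career progression."""
--     if len(experience) < 2:
--         return "entry"
--
--     # Simple analysis based on titles
--     titles = [exp.get("title", "").lower() for exp in experience]
--
--     if any("senior" in title or "lead" in title for title in titles):
--         return "senior"
--     elif any("manager" in title or "director" in title for title in titles):
--         return "management"
--     else:
--         return "mid"
-- ===== SOURCE B (Python) =====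
-- from typing import Dict, List, Any, Optional
--
-- def _rank(title: str) -> int:
--     if "senior" in title or "lead" in title:
--         return 2
--     if "manager" in title or "director" in title:
--         return 1
--     return 0
--
-- def _analyze_career_progression(experience: List[Dict[str, Any]]) -> str:
--     """Analyze career progression via a single best-rank fold."""
--     if len(experience) < 2:
--         return "entry"
--     best = 0
--     for exp in experience:
--         best = max(best, _rank(exp.get("title", "").lower()))
--     return ("mid", "management", "senior")[best]
-- ===== Notes on version B (the rewrite author's own statement) =====
-- stated objective: alternative
-- what changed: Replaces A's two sequential any-scans over a precomputed title list with a single fold that keeps a running maximum numeric rank per title, mapped to a label at the end.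
import Mathlib
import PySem

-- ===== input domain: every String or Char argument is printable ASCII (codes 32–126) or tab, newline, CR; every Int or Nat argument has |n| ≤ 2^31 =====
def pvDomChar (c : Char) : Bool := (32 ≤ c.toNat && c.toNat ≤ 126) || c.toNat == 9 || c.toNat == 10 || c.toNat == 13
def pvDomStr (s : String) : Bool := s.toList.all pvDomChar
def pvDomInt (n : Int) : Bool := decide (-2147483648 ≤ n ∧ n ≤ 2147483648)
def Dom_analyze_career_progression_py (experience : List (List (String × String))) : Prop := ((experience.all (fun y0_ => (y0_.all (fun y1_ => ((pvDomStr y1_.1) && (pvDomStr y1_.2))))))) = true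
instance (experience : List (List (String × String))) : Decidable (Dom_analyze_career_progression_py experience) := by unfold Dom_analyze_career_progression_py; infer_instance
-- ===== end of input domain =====

-- B replaces A's two sequential any-scans with one running-max-rank fold; objective: alternative (same cost).

-- ===== PORT A =====
def analyze_career_progression_py (experience : List (List (String × String))) : String :=
  if experience.length < 2 then "entry"
  else
    let titles := experience.map (fun exp => PySem.Str.lower (PySem.Dict.getD (PySem.Dict.mk exp) "title" ""))
    if titles.any (fun title => PySem.Str.isIn "senior" title || PySem.Str.isIn "lead" title) then "senior"
    else if titles.any (fun title => PySem.Str.isIn "manager" title || PySem.Str.isIn "director" title) then "management"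
    else "mid"

-- ===== PORT B =====
def rankB (title : String) : Nat :=
  if PySem.Str.isIn "senior" title || PySem.Str.isIn "lead" title then 2
  else if PySem.Str.isIn "manager" title || PySem.Str.isIn "director" title then 1
  else 0

def analyze_career_progression_py_alt (experience : List (List (String × String))) : String :=
  if experience.length < 2 then "entry"
  else
    let best := experience.foldl
      (fun best exp => max best (rankB (PySem.Str.lower (PySem.Dict.getD (PySem.Dict.mk exp) "title" "")))) 0
    -- ("mid", "management", "senior")[best], best ∈ {0,1,2}
    if best = 2 then "senior" else if best = 1 then "management" else "mid"

-- ===== PRECONDITION & SPEC =====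
def Spec_analyze_career_progression_py (experience : List (List (String × String))) (out : String) : Prop := out = analyze_career_progression_py_alt experience
instance (experience : List (List (String × String))) (out : String) : Decidable (Spec_analyze_career_progression_py experience out) := by unfold Spec_analyze_career_progression_py; infer_instance

-- ===== CLAIM (what is proved, stated in full; the proofs are below) =====
def Claim_equal_analyze_career_progression_py : Prop := ∀ (experience : List (List (String × String))), Dom_analyze_career_progression_py experience → Spec_analyze_career_progression_py experience (analyze_career_progression_py experience)

-- ===== LEMMAS AND PROOFS =====

-- the running-max fold computes exactly A's two-scan decision, for any starting accumulator
theorem foldl_rank_gen {α : Type} (p q : α → Bool) (l : List α) (acc : Nat) :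
    l.foldl (fun best x => max best (if p x then 2 else if q x then 1 else 0)) acc
      = max acc (if l.any p then 2 else if l.any q then 1 else 0) := by
  induction l generalizing acc with
  | nil => simp
  | cons x l ih =>
    rw [List.foldl_cons, ih, List.any_cons, List.any_cons]
    cases hp : p x <;> cases hq : q x <;>
      cases h1 : l.any p <;> cases h2 : l.any q <;> simp

theorem analyze_career_progression_py_spec' (experience : List (List (String × String))) :
    analyze_career_progression_py experience = analyze_career_progression_py_alt experience := by
  unfold analyze_career_progression_py analyze_career_progression_py_alt
  by_cases h : experience.length < 2
  · simp [h]
  · simp only [h, if_false, rankB, List.any_map,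
      foldl_rank_gen
        (fun exp => PySem.Str.isIn "senior" (PySem.Str.lower (PySem.Dict.getD (PySem.Dict.mk exp) "title" "")) ||
                    PySem.Str.isIn "lead" (PySem.Str.lower (PySem.Dict.getD (PySem.Dict.mk exp) "title" "")))
        (fun exp => PySem.Str.isIn "manager" (PySem.Str.lower (PySem.Dict.getD (PySem.Dict.mk exp) "title" "")) ||
                    PySem.Str.isIn "director" (PySem.Str.lower (PySem.Dict.getD (PySem.Dict.mk exp) "title" ""))),
      Nat.zero_max, Function.comp_def]
    split_ifs <;> simp_all

-- ===== VERDICT (by name: the statement is the Claim_ definition above) =====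
theorem analyze_career_progression_py_spec : Claim_equal_analyze_career_progression_py := by
  intro experience _
  exact analyze_career_progression_py_spec' experience
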